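-- pv_equiv track=rewrite | github.com/Valdirsbarreto/Escriv-o | backend/app/workers/peca_extraction_task.py | _extrair_conteudo_por_ancora
-- ===== SOURCE A (Python) =====
-- def _extrair_conteudo_por_ancora(texto_doc: str, pecas_data: list) -> list:
--     """
--     Localiza cada peça no texto do documento usando 'trecho_inicio' como âncora.
--     Extrai o texto entre o início de uma peça e o início da próxima.
--     """
--     # Encontra a posição de início de cada peça
--     posicoes = []
--     for p in pecas_data:
--         ancora = (p.get("trecho_inicio") or "").strip()
--         if not ancora:
--             posicoes.append(-1)
--             continue
--         # Busca pelos primeiros 60 chars para tolerar pequenas variações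
--         busca = ancora[:60].strip()
--         idx = texto_doc.find(busca)
--         posicoes.append(idx)
--
--     resultados = []
--     for i, (p, pos_ini) in enumerate(zip(pecas_data, posicoes)):
--         if pos_ini < 0:
--             # Âncora não encontrada — usa o trecho_inicio como fallback
--             conteudo = p.get("trecho_inicio") or ""
--         else:
--             # Fim desta peça = início da próxima (ou fim do doc)
--             pos_fim = len(texto_doc)
--             for j in range(i + 1, len(posicoes)):
--                 if posicoes[j] > pos_ini:
--                     pos_fim = posicoes[j]
--                     break
--             conteudo = texto_doc[pos_ini:pos_fim].strip()
--
--         resultados.append({**p, "conteudo_texto": conteudo})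
--
--     return resultados
-- ===== SOURCE B (Python) =====
-- def _extrair_conteudo_por_ancora(texto_doc: str, pecas_data: list) -> list:
--     def _pos(p):
--         ancora = (p.get("trecho_inicio") or "").strip()
--         if not ancora:
--             return -1
--         return texto_doc.find(ancora[:60].strip())
--
--     posicoes = [_pos(p) for p in pecas_data]
--
--     # next strictly greater position to the right, via one right-to-left
--     # monotonic-stack pass (default: end of document)
--     stack = []
--     next_pos = []
--     for q in reversed(posicoes):
--         while stack and stack[-1] <= q:
--             stack.pop()
--         next_pos.append(stack[-1] if stack else len(texto_doc))
--         stack.append(q)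
--     next_pos.reverse()
--
--     resultados = []
--     for p, pos_ini, pos_fim in zip(pecas_data, posicoes, next_pos):
--         if pos_ini < 0:
--             conteudo = p.get("trecho_inicio") or ""
--         else:
--             conteudo = texto_doc[pos_ini:pos_fim].strip()
--         resultados.append({**p, "conteudo_texto": conteudo})
--     return resultados
-- ===== Notes on version B (the rewrite author's own statement) =====
-- stated objective: alternative
-- what changed: The quadratic inner rescan for the next strictly greater anchor position is replaced by a single right-to-left monotonic-stack pass computing all slice endpoints at once.
import Mathlib
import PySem

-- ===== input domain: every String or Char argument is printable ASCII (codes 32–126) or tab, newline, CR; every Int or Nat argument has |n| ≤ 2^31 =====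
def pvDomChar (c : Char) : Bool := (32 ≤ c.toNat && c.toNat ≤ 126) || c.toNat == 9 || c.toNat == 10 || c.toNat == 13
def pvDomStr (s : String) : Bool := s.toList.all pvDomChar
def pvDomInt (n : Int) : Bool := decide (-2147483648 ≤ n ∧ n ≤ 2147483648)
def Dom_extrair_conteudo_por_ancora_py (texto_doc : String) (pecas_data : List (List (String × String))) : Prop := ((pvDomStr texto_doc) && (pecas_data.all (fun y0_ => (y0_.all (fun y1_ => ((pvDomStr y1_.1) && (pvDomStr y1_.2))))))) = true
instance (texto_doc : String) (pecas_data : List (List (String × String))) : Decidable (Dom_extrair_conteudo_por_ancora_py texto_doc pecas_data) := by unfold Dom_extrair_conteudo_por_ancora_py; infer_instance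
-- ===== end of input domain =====

-- B replaces A's quadratic inner rescan for the next greater anchor position by one
-- right-to-left monotonic-stack pass (objective: alternative algorithm, same results).

-- ===== PORT A =====
-- inner loop 'for j in range(i+1, …): if posicoes[j] > pos_ini: pos_fim = posicoes[j]; break'
def pvFindFim (rest : List Int) (pos_ini : Int) (dflt : Int) : Int :=
  match rest with
  | [] => dflt
  | q :: rest' => if q > pos_ini then q else pvFindFim rest' pos_ini dflt

-- second loop of A over zip(pecas_data, posicoes); the remaining positions are posicoes[i+1:]
def pvALoop (texto_doc : String) : List ((List (String × String)) × Int) → List (List (String × String))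
  | [] => []
  | (p, pos_ini) :: rest =>
    let conteudo :=
      if pos_ini < 0 then ((PySem.Dict.ofList p).get? "trecho_inicio").getD ""
      else
        let pos_fim := pvFindFim (rest.map Prod.snd) pos_ini (PySem.Str.len texto_doc)
        PySem.Str.strip (PySem.Str.slice texto_doc (some pos_ini) (some pos_fim))
    ((PySem.Dict.ofList p).insert "conteudo_texto" conteudo).items :: pvALoop texto_doc rest

def extrair_conteudo_por_ancora_py (texto_doc : String) (pecas_data : List (List (String × String))) : List (List (String × String)) :=
  let posicoes : List Int := pecas_data.foldl (fun acc p =>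
    let ancora := PySem.Str.strip (((PySem.Dict.ofList p).get? "trecho_inicio").getD "")
    if ancora = "" then acc ++ [(-1 : Int)]
    else
      let busca := PySem.Str.strip (PySem.Str.slice ancora none (some 60))
      acc ++ [PySem.Str.find texto_doc busca]) []
  pvALoop texto_doc (pecas_data.zip posicoes)

-- ===== PORT B =====
def pvAnchorPos (texto_doc : String) (p : List (String × String)) : Int :=
  let ancora := PySem.Str.strip (((PySem.Dict.ofList p).get? "trecho_inicio").getD "")
  if ancora = "" then -1
  else PySem.Str.find texto_doc (PySem.Str.strip (PySem.Str.slice ancora none (some 60)))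

-- right-to-left monotonic-stack pass: returns (stack, next_pos) for the given position list
def pvNextGreater (dflt : Int) : List Int → List Int × List Int
  | [] => ([], [])
  | q :: rest =>
    let (st, nx) := pvNextGreater dflt rest
    let st' := st.dropWhile (fun t => t ≤ q)
    (q :: st', st'.headD dflt :: nx)

def pvBuild (texto_doc : String) : List ((List (String × String)) × Int × Int) → List (List (String × String))
  | [] => []
  | (p, pos_ini, pos_fim) :: rest =>
    let conteudo :=
      if pos_ini < 0 then ((PySem.Dict.ofList p).get? "trecho_inicio").getD ""
      else PySem.Str.strip (PySem.Str.slice texto_doc (some pos_ini) (some pos_fim))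
    ((PySem.Dict.ofList p).insert "conteudo_texto" conteudo).items :: pvBuild texto_doc rest

def extrair_conteudo_por_ancora_py_alt (texto_doc : String) (pecas_data : List (List (String × String))) : List (List (String × String)) :=
  let posicoes := pecas_data.map (pvAnchorPos texto_doc)
  let next_pos := (pvNextGreater (PySem.Str.len texto_doc) posicoes).2
  pvBuild texto_doc (pecas_data.zip (posicoes.zip next_pos))

-- ===== PRECONDITION & SPEC =====
def Spec_extrair_conteudo_por_ancora_py (texto_doc : String) (pecas_data : List (List (String × String))) (out : List (List (String × String))) : Prop := out = extrair_conteudo_por_ancora_py_alt texto_doc pecas_data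
instance (texto_doc : String) (pecas_data : List (List (String × String))) (out : List (List (String × String))) : Decidable (Spec_extrair_conteudo_por_ancora_py texto_doc pecas_data out) := by unfold Spec_extrair_conteudo_por_ancora_py; infer_instance

-- ===== CLAIM (what is proved, stated in full; the proofs are below) =====
def Claim_equal_extrair_conteudo_por_ancora_py : Prop := ∀ (texto_doc : String) (pecas_data : List (List (String × String))), Dom_extrair_conteudo_por_ancora_py texto_doc pecas_data → Spec_extrair_conteudo_por_ancora_py texto_doc pecas_data (extrair_conteudo_por_ancora_py texto_doc pecas_data)

-- ===== LEMMAS AND PROOFS =====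

-- ghost: the strict left-to-right records of the suffix = the stack contents
def pvRecords : List Int → List Int
  | [] => []
  | q :: rest => q :: (pvRecords rest).dropWhile (fun t => t ≤ q)

-- ghost: the naive next-greater list
def pvNx (dflt : Int) : List Int → List Int
  | [] => []
  | q :: rest => pvFindFim rest q dflt :: pvNx dflt rest

theorem pv_dropWhile_dropWhile {p p' : Int → Bool} (h : ∀ a, p a = true → p' a = true) :
    ∀ l : List Int, (l.dropWhile p).dropWhile p' = l.dropWhile p' := by
  intro l
  induction l with
  | nil => rfl
  | cons a t ih =>
    by_cases hp : p a = true
    · rw [List.dropWhile_cons_of_pos hp, ih, List.dropWhile_cons_of_pos (h a hp)]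
    · rw [List.dropWhile_cons_of_neg hp]

theorem pvFindFim_records (xs : List Int) (q dflt : Int) :
    pvFindFim xs q dflt = ((pvRecords xs).dropWhile (fun t => t ≤ q)).headD dflt := by
  induction xs with
  | nil => rfl
  | cons x rest ih =>
    simp only [pvFindFim, pvRecords]
    by_cases hx : x > q
    · rw [List.dropWhile_cons_of_neg (by simp; omega)]
      simp [hx]
    · rw [if_neg hx, List.dropWhile_cons_of_pos (by simp; omega),
          pv_dropWhile_dropWhile (p := fun t => t ≤ x) (p' := fun t => t ≤ q)
            (fun a ha => by simp at ha ⊢; omega), ih]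

theorem pvNextGreater_eq (dflt : Int) (l : List Int) :
    pvNextGreater dflt l = (pvRecords l, pvNx dflt l) := by
  induction l with
  | nil => rfl
  | cons q rest ih =>
    simp only [pvNextGreater, pvRecords, pvNx, ih, pvFindFim_records]

theorem pvLoop_eq_build (texto_doc : String) :
    ∀ (ps : List (List (String × String))) (pos : List Int), ps.length = pos.length →
    pvALoop texto_doc (ps.zip pos) =
      pvBuild texto_doc (ps.zip (pos.zip (pvNx (PySem.Str.len texto_doc) pos))) := by
  intro ps
  induction ps with
  | nil => intro pos _; rfl
  | cons p ps' ih =>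
    intro pos hlen
    cases pos with
    | nil => simp at hlen
    | cons q pos' =>
      simp only [List.length_cons] at hlen
      simp only [List.zip_cons_cons, pvALoop, pvBuild, pvNx]
      rw [List.map_snd_zip (by omega), ih pos' (by omega)]

theorem extrair_conteudo_por_ancora_py_eq (texto_doc : String) (pecas_data : List (List (String × String))) :
    extrair_conteudo_por_ancora_py texto_doc pecas_data = extrair_conteudo_por_ancora_py_alt texto_doc pecas_data := by
  unfold extrair_conteudo_por_ancora_py extrair_conteudo_por_ancora_py_alt
  have hbody : (fun (acc : List Int) (p : List (String × String)) =>
      let ancora := PySem.Str.strip (((PySem.Dict.ofList p).get? "trecho_inicio").getD "")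
      if ancora = "" then acc ++ [(-1 : Int)]
      else
        let busca := PySem.Str.strip (PySem.Str.slice ancora none (some 60))
        acc ++ [PySem.Str.find texto_doc busca]) =
      (fun acc p => acc ++ [pvAnchorPos texto_doc p]) := by
    funext acc p
    simp only [pvAnchorPos]
    split_ifs <;> rfl
  rw [hbody, PySem.List.foldl_append_singleton_eq_map, List.nil_append]
  show pvALoop texto_doc _ = pvBuild texto_doc _
  rw [pvNextGreater_eq]
  exact pvLoop_eq_build texto_doc pecas_data _ (by simp)

-- ===== VERDICT (by name: the statement is the Claim_ definition above) =====
theorem extrair_conteudo_por_ancora_py_spec : Claim_equal_extrair_conteudo_por_ancora_py := by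
  intro texto_doc pecas_data _
  exact extrair_conteudo_por_ancora_py_eq texto_doc pecas_data
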